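-- pv_equiv track=rewrite | github.com/chenyueg/leetcode | 1829_Maximum_XOR_for_Each_Query/chenyueg.py | getMaximumXor
-- ===== SOURCE A (Python) =====
-- from typing import List
--
-- def getMaximumXor(nums: List[int], maximumBit: int) -> List[int]:
--     n = len(nums)
--     xorres = nums[0]
--     max_xor = (1 << maximumBit) - 1
--     ans = []
--
--     for i in range(1, n):
--         xorres ^= nums[i]
--
--     for i in range(n):
--         ans.append(xorres ^ max_xor)
--         xorres ^= nums[n - 1 - i]
--
--     return ans
-- ===== SOURCE B (Python) =====
-- from typing import List
--
-- def getMaximumXor(nums: List[int], maximumBit: int) -> List[int]: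
--     max_xor = (1 << maximumBit) - 1
--     p = [nums[0]]
--     for x in nums[1:]:
--         p.append(p[-1] ^ x)
--     n = len(nums)
--     return [p[n - 1 - i] ^ max_xor for i in range(n)]
-- ===== Notes on version B (the rewrite author's own statement) =====
-- stated objective: alternative
-- what changed: B builds an explicit prefix-XOR table in one forward element pass and produces the answers by pure reverse indexing into that table, instead of A's two index loops over a single decremented running XOR scalar.
import Mathlib
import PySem

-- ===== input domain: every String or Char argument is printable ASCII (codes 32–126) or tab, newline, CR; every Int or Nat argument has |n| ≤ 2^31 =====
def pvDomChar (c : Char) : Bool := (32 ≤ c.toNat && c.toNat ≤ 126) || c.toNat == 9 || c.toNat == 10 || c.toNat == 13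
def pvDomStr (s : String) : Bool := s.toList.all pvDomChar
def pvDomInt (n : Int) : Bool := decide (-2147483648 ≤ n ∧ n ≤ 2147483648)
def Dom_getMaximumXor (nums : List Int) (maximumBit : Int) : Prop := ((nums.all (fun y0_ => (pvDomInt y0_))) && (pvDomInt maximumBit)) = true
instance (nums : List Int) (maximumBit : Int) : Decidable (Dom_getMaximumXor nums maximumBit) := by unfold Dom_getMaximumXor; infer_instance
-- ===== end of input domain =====

-- B replaces A's two index loops over one decremented running-XOR scalar by a stored
-- prefix-XOR table built in a single forward element pass, read back by reverse indexing
-- (objective: alternative decomposition, same O(n) cost).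

-- ===== PORT A =====
def getMaximumXor (nums : List Int) (maximumBit : Int) : List Int :=
  let n : Int := nums.length
  let xorres0 : Int := PySem.List.pyGetD nums 0 0
  let max_xor : Int := (1 <<< maximumBit.toNat) - 1
  let xorres : Int := (PySem.List.pyRange 1 n 1).foldl
    (fun acc i => PySem.Int.bxor acc (PySem.List.pyGetD nums i 0)) xorres0
  let st := (PySem.List.pyRange 0 n 1).foldl
    (fun (st : List Int × Int) i =>
      (st.1 ++ [PySem.Int.bxor st.2 max_xor],
       PySem.Int.bxor st.2 (PySem.List.pyGetD nums (n - 1 - i) 0))) ([], xorres)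
  st.1

-- ===== PORT B =====
def getMaximumXor_alt (nums : List Int) (maximumBit : Int) : List Int :=
  let max_xor : Int := (1 <<< maximumBit.toNat) - 1
  let p : List Int := (PySem.List.slice nums (some 1) none).foldl
    (fun p x => p ++ [PySem.Int.bxor (PySem.List.pyGetD p (-1) 0) x])
    [PySem.List.pyGetD nums 0 0]
  let n : Int := nums.length
  (PySem.List.pyRange 0 n 1).map
    (fun i => PySem.Int.bxor (PySem.List.pyGetD p (n - 1 - i) 0) max_xor)

-- ===== PRECONDITION & SPEC =====
-- Pre_ excludes exactly the inputs where A raises: empty nums (IndexError at nums[0])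
-- and negative maximumBit (ValueError at 1 << maximumBit).
def Pre_getMaximumXor (nums : List Int) (maximumBit : Int) : Prop :=
  nums ≠ [] ∧ 0 ≤ maximumBit
instance (nums : List Int) (maximumBit : Int) : Decidable (Pre_getMaximumXor nums maximumBit) := by
  unfold Pre_getMaximumXor; infer_instance

def pvWitness_getMaximumXor : List Int × Int := ([1, 2, 5], 3)

def Spec_getMaximumXor (nums : List Int) (maximumBit : Int) (out : List Int) : Prop := out = getMaximumXor_alt nums maximumBit
instance (nums : List Int) (maximumBit : Int) (out : List Int) : Decidable (Spec_getMaximumXor nums maximumBit out) := by unfold Spec_getMaximumXor; infer_instance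

-- ===== CLAIM (what is proved, stated in full; the proofs are below) =====
def Claim_equal_getMaximumXor : Prop := ∀ (nums : List Int) (maximumBit : Int), Dom_getMaximumXor nums maximumBit → Pre_getMaximumXor nums maximumBit → Spec_getMaximumXor nums maximumBit (getMaximumXor nums maximumBit)

-- ===== LEMMAS AND PROOFS =====

-- Python xor cancels on the right (sign-case analysis over PySem's two's-complement encoding).
lemma bxor_cancel_right (a b : Int) : PySem.Int.bxor (PySem.Int.bxor a b) b = a := by
  rcases le_or_gt 0 a with ha | ha <;> rcases le_or_gt 0 b with hb | hb
  · have hin : PySem.Int.bxor a b = ((a.toNat ^^^ b.toNat : Nat) : Int) := by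
      unfold PySem.Int.bxor; rw [if_pos ha, if_pos hb]
    rw [hin]
    unfold PySem.Int.bxor
    rw [if_pos (by positivity), if_pos hb]
    simp [Nat.xor_xor_cancel_right, Int.toNat_of_nonneg ha]
  · have hin : PySem.Int.bxor a b = -((a.toNat ^^^ (-b - 1).toNat : Nat) : Int) - 1 := by
      unfold PySem.Int.bxor; rw [if_pos ha, if_neg (by omega)]
    rw [hin]
    unfold PySem.Int.bxor
    rw [if_neg (by omega), if_neg (by omega)]
    have h1 : (-(-((a.toNat ^^^ (-b - 1).toNat : Nat) : Int) - 1) - 1).toNat = a.toNat ^^^ (-b - 1).toNat := by omega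
    rw [h1, Nat.xor_xor_cancel_right, Int.toNat_of_nonneg ha]
  · have hin : PySem.Int.bxor a b = -(((-a - 1).toNat ^^^ b.toNat : Nat) : Int) - 1 := by
      unfold PySem.Int.bxor; rw [if_neg (by omega), if_pos hb]
    rw [hin]
    unfold PySem.Int.bxor
    rw [if_neg (by omega), if_pos hb]
    have h1 : (-(-(((-a - 1).toNat ^^^ b.toNat : Nat) : Int) - 1) - 1).toNat = (-a - 1).toNat ^^^ b.toNat := by omega
    rw [h1, Nat.xor_xor_cancel_right]
    omega
  · have hin : PySem.Int.bxor a b = (((-a - 1).toNat ^^^ (-b - 1).toNat : Nat) : Int) := by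
      unfold PySem.Int.bxor; rw [if_neg (by omega), if_neg (by omega)]
    rw [hin]
    unfold PySem.Int.bxor
    rw [if_pos (by positivity), if_neg (by omega)]
    have h1 : ((((-a - 1).toNat ^^^ (-b - 1).toNat : Nat) : Int)).toNat = (-a - 1).toNat ^^^ (-b - 1).toNat := by omega
    rw [h1, Nat.xor_xor_cancel_right]
    omega

-- prefix-XOR table: prefList a l = [a, a^l0, a^l0^l1, …]
def prefList (a : Int) : List Int → List Int
  | [] => [a]
  | y :: ys => a :: prefList (PySem.Int.bxor a y) ys

lemma prefList_length (l : List Int) : ∀ a : Int, (prefList a l).length = l.length + 1 := by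
  induction l with
  | nil => intro a; rfl
  | cons y ys ih => intro a; simp [prefList, ih]

lemma prefList_append (l : List Int) : ∀ (a v : Int),
    prefList a (l ++ [v]) = prefList a l ++ [PySem.Int.bxor (l.foldl PySem.Int.bxor a) v] := by
  induction l with
  | nil => intro a v; rfl
  | cons y ys ih => intro a v; simp [prefList, ih]

-- B's table-building loop produces exactly prefList.
lemma buildP (l : List Int) : ∀ (A : List Int) (a : Int),
    l.foldl (fun p x => p ++ [PySem.Int.bxor (PySem.List.pyGetD p (-1) 0) x]) (A ++ [a])
      = A ++ prefList a l := by
  induction l with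
  | nil => intro A a; rfl
  | cons y ys ih =>
    intro A a
    simp only [List.foldl_cons, PySem.List.pyGetD_neg_one_append_singleton]
    have : (A ++ [a]) ++ [PySem.Int.bxor a y] = (A ++ [a]) ++ [PySem.Int.bxor a y] := rfl
    rw [show A ++ [a] ++ [PySem.Int.bxor a y] = (A ++ [a]) ++ [PySem.Int.bxor a y] from rfl,
        ih (A ++ [a]) (PySem.Int.bxor a y)]
    simp [prefList]

-- a map over range(n) of h(n-1-i) is the reversed map of h.
lemma revmap (h : Int → Int) (n : Nat) :
    (PySem.List.pyRange 0 (n : Int) 1).map (fun i => h ((n : Int) - 1 - i))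
      = ((PySem.List.pyRange 0 (n : Int) 1).map h).reverse := by
  apply List.ext_getElem
  · simp [PySem.List.length_pyRange_one]
  · intro k h1 h2
    simp only [List.getElem_map, List.getElem_reverse, List.length_map,
      PySem.List.length_pyRange_one, PySem.List.getElem_pyRange_one]
    congr 1
    have hk : k < n := by
      simpa [PySem.List.length_pyRange_one] using h1
    have hlen : ((n : Int) - 0).toNat = n := by omega
    rw [hlen] at *
    push_cast [Nat.sub_sub]
    omega

-- A's second loop walks nums backwards: the index fold is the fold over nums.reverse.
lemma loop2_range (nums : List Int) (m : Int) (init : List Int × Int) :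
    (PySem.List.pyRange 0 (nums.length : Int) 1).foldl
      (fun st i => (st.1 ++ [PySem.Int.bxor st.2 m],
        PySem.Int.bxor st.2 (PySem.List.pyGetD nums ((nums.length : Int) - 1 - i) 0))) init
    = nums.reverse.foldl
      (fun st v => (st.1 ++ [PySem.Int.bxor st.2 m], PySem.Int.bxor st.2 v)) init := by
  have hmap : (PySem.List.pyRange 0 (nums.length : Int) 1).map
      (fun i => PySem.List.pyGetD nums ((nums.length : Int) - 1 - i) 0) = nums.reverse := by
    rw [revmap (fun j => PySem.List.pyGetD nums j 0) nums.length,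
        PySem.List.map_pyGetD_pyRange_zero']
  rw [← hmap, List.foldl_map]

-- A's answer loop, run over the reversed list from the total XOR, emits the reversed prefix table XORed with m.
lemma loop2_core (m : Int) (l : List Int) : ∀ (x : Int) (ans : List Int),
    (x :: l).reverse.foldl
      (fun st v => (st.1 ++ [PySem.Int.bxor st.2 m], PySem.Int.bxor st.2 v))
      (ans, l.foldl PySem.Int.bxor x)
    = (ans ++ (prefList x l).reverse.map (fun v => PySem.Int.bxor v m), 0) := by
  induction l using List.reverseRecOn with
  | nil =>
    intro x ans
    simp [prefList, PySem.Int.bxor_self]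
  | append_singleton rs v ih =>
    intro x ans
    have hrev : (x :: (rs ++ [v])).reverse = v :: (x :: rs).reverse := by
      simp
    rw [hrev, List.foldl_cons, List.foldl_append]
    simp only [List.foldl_cons, List.foldl_nil]
    rw [bxor_cancel_right (rs.foldl PySem.Int.bxor x) v]
    rw [ih x (ans ++ [PySem.Int.bxor (PySem.Int.bxor (rs.foldl PySem.Int.bxor x) v) m])]
    rw [prefList_append]
    simp

-- B's comprehension is the reversed table XORed with m.
lemma B_map (p : List Int) (m : Int) :
    (PySem.List.pyRange 0 (p.length : Int) 1).map
      (fun i => PySem.Int.bxor (PySem.List.pyGetD p ((p.length : Int) - 1 - i) 0) m)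
    = p.reverse.map (fun v => PySem.Int.bxor v m) := by
  rw [revmap (fun j => PySem.Int.bxor (PySem.List.pyGetD p j 0) m) p.length]
  have : (PySem.List.pyRange 0 (p.length : Int) 1).map
      (fun j => PySem.Int.bxor (PySem.List.pyGetD p j 0) m)
      = ((PySem.List.pyRange 0 (p.length : Int) 1).map
          (fun j => PySem.List.pyGetD p j 0)).map (fun v => PySem.Int.bxor v m) := by
    rw [List.map_map]; rfl
  rw [this, PySem.List.map_pyGetD_pyRange_zero', List.map_reverse]

-- ===== VERDICT (by name: the statement is the Claim_ definition above) =====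
theorem getMaximumXor_spec : Claim_equal_getMaximumXor := by
  intro nums maximumBit _ hpre
  obtain ⟨hne, -⟩ := hpre
  obtain ⟨x, rest, rfl⟩ := List.exists_cons_of_ne_nil hne
  unfold Spec_getMaximumXor getMaximumXor getMaximumXor_alt
  simp only [PySem.List.pyGetD_zero_cons, PySem.List.slice_from_one, List.tail_cons]
  -- B's table
  have hp : rest.foldl (fun p x => p ++ [PySem.Int.bxor (PySem.List.pyGetD p (-1) 0) x]) [x]
      = prefList x rest := by
    have := buildP rest [] x
    simpa using this
  rw [hp]
  -- A's first loop: the total XOR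
  have h1 : (PySem.List.pyRange 1 ((x :: rest).length : Int) 1).foldl
      (fun acc i => PySem.Int.bxor acc (PySem.List.pyGetD (x :: rest) i 0)) x
      = rest.foldl PySem.Int.bxor x := by
    have := PySem.List.foldl_pyRange_pyGetD' (x :: rest) 0 PySem.Int.bxor x (a := 1) (by omega)
    simpa using this
  rw [h1]
  -- A's second loop
  rw [loop2_range (x :: rest) ((1 <<< maximumBit.toNat) - 1) ([], rest.foldl PySem.Int.bxor x),
      loop2_core ((1 <<< maximumBit.toNat) - 1) rest x []]
  -- B's comprehension
  have hlen : ((x :: rest).length : Int) = ((prefList x rest).length : Int) := by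
    rw [prefList_length]; simp
  rw [hlen, B_map (prefList x rest) ((1 <<< maximumBit.toNat) - 1)]
  simp
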